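-- pv_equiv track=rewrite | github.com/agsotopl/Lab | pages/lab3.py | maintain_buffer
-- ===== SOURCE A (Python) =====
-- def maintain_buffer(messages, max_user_messages=2):
--     system_message = None
--     non_system_messages = []
--
--     for msg in messages:
--         if msg["role"] == "system":
--             system_message = msg
--         else:
--             non_system_messages.append(msg)
--
--     if len(non_system_messages) <= 1:
--         return messages
--
--     # Find user messages and indices
--     user_indices = [i for i, msg in enumerate(non_system_messages) if msg["role"] == "user"]
--
--     if len(user_indices) <= max_user_messages:
--         return messages
--
--     # Keep only last user message
--     indices_to_keep = set(user_indices[-max_user_messages:])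
--
--     # Keep the assistant response that follows
--     for idx in list(indices_to_keep):
--         if idx + 1 < len(non_system_messages) and non_system_messages[idx + 1]["role"] == "assistant":
--             indices_to_keep.add(idx + 1)
--
--     # Rebuild messages list
--     filtered = [non_system_messages[i] for i in range(len(non_system_messages)) if i in indices_to_keep]
--
--     # Prepend system message
--     if system_message:
--         return [system_message] + filtered
--     return filtered
-- ===== SOURCE B (Python) =====
-- def maintain_buffer(messages, max_user_messages=2):
--     system_message = None
--     non_system_messages = []
--     for msg in messages:
--         if msg["role"] == "system":
--             system_message = msg
--         else:
--             non_system_messages.append(msg)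
--
--     if len(non_system_messages) <= 1:
--         return messages
--
--     total_users = sum(1 for m in non_system_messages if m["role"] == "user")
--     if total_users <= max_user_messages:
--         return messages
--
--     # Single streaming pass: keep the last max_user_messages users (rank >= threshold)
--     # and each assistant message that directly follows a kept user.
--     threshold = total_users - max_user_messages
--     out = [system_message] if system_message else []
--     rank = 0
--     prev_kept_user = False
--     for m in non_system_messages:
--         if m["role"] == "user":
--             if rank >= threshold:
--                 out.append(m)
--                 prev_kept_user = True
--             else:
--                 prev_kept_user = False
--             rank += 1
--         else:
--             if m["role"] == "assistant" and prev_kept_user: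
--                 out.append(m)
--             prev_kept_user = False
--     return out
-- ===== Notes on version B (the rewrite author's own statement) =====
-- stated objective: simpler
-- what changed: A's user-index list, keep-set with a follow-up pass, and index-membership rebuild over range(n) are replaced by one streaming pass over the non-system messages that keeps a user iff its rank reaches total_users - max_user_messages and keeps an assistant iff it directly follows a kept user (a prev-kept flag).
-- intended difference: When max_user_messages <= 0 and the trim path is reached (at least two non-system messages and more than -max_user_messages users), A's slice user_indices[-max_user_messages:] accidentally keeps the last total+max (for 0: all) user messages plus followers, while B keeps none of them (just the system message, if any), which is the intended meaning of keeping at most max_user_messages user messages. — e.g. on maintain_buffer([[("role", "user")], [("role", "user")]], 0): A returns [[("role", "user")], [("role", "user")]], B returns []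
import Mathlib
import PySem

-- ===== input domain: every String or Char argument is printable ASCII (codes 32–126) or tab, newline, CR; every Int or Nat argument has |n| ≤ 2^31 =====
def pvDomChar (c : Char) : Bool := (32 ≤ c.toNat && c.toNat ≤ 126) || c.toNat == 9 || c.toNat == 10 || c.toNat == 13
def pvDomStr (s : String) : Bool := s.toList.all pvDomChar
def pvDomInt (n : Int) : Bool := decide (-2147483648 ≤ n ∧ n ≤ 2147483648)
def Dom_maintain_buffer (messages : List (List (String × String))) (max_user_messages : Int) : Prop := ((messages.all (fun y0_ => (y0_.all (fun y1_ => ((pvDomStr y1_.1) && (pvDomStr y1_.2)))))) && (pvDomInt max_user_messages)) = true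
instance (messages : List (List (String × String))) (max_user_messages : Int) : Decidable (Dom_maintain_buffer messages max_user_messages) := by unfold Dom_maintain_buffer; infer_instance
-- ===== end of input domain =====

-- B replaces A's index-list / keep-set / index-membership rebuild with one streaming pass
-- (user-rank counter + previous-kept-user flag): simpler, same O(n) cost.

-- msg["role"] — first-match association-list lookup; total form used under Pre_ (key present)
def pvRole (msg : List (String × String)) : String :=
  (PySem.Dict.mk msg).getD "role" ""

-- the first loop, identical in A and in B: last system message + the non-system messages in order
def pvSplit (messages : List (List (String × String))) :
    Option (List (String × String)) × List (List (String × String)) :=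
  messages.foldl
    (fun st msg => if pvRole msg = "system" then (some msg, st.2) else (st.1, st.2 ++ [msg]))
    (none, [])

-- 'if system_message: return [system_message] + filtered / return filtered' (dict truthiness)
def pvPrepend (system_message : Option (List (String × String)))
    (filtered : List (List (String × String))) : List (List (String × String)) :=
  match system_message with
  | some s => if s ≠ [] then [s] ++ filtered else filtered
  | none => filtered

-- ===== PORT A =====
def maintain_buffer (messages : List (List (String × String))) (max_user_messages : Int) :
    List (List (String × String)) :=
  let st := pvSplit messages
  let system_message := st.1
  let non_system_messages := st.2
  if non_system_messages.length ≤ 1 then messages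
  else
    let user_indices : List Int :=
      (PySem.List.enumerate non_system_messages).foldl
        (fun acc p => if pvRole p.2 = "user" then acc ++ [p.1] else acc) []
    if (user_indices.length : Int) ≤ max_user_messages then messages
    else
      let keep0 : PySem.Set Int :=
        PySem.Set.ofList (PySem.List.slice user_indices (some (-max_user_messages)) none)
      let keep : PySem.Set Int :=
        keep0.foldl
          (fun s idx =>
            if idx + 1 < (non_system_messages.length : Int) ∧
                pvRole (PySem.List.pyGetD non_system_messages (idx + 1) []) = "assistant"
            then PySem.Set.add s (idx + 1) else s)
          keep0
      let filtered :=
        (PySem.List.pyRange 0 (non_system_messages.length : Int)).foldl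
          (fun acc i =>
            if PySem.Set.contains keep i
            then acc ++ [PySem.List.pyGetD non_system_messages i []] else acc)
          []
      pvPrepend system_message filtered

-- ===== PORT B =====
def maintain_buffer_alt (messages : List (List (String × String))) (max_user_messages : Int) :
    List (List (String × String)) :=
  let st := pvSplit messages
  let system_message := st.1
  let non_system_messages := st.2
  if non_system_messages.length ≤ 1 then messages
  else
    let total_users : Int :=
      non_system_messages.foldl (fun n m => if pvRole m = "user" then n + 1 else n) 0
    if total_users ≤ max_user_messages then messages
    else
      let threshold := total_users - max_user_messages
      let out0 : List (List (String × String)) :=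
        match system_message with
        | some s => if s ≠ [] then [s] else []
        | none => []
      let fin :=
        non_system_messages.foldl
          (fun (st : Int × Bool × List (List (String × String))) m =>
            if pvRole m = "user" then
              if st.1 ≥ threshold then (st.1 + 1, true, st.2.2 ++ [m])
              else (st.1 + 1, false, st.2.2)
            else
              if pvRole m = "assistant" ∧ st.2.1 then (st.1, false, st.2.2 ++ [m])
              else (st.1, false, st.2.2))
          (0, false, out0)
      fin.2.2

-- ===== PRECONDITION & SPEC =====
-- Pre_ excludes exactly the inputs where Python A raises KeyError: a message without a "role" key.
def Pre_maintain_buffer (messages : List (List (String × String))) (max_user_messages : Int) : Prop :=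
  ∀ m ∈ messages, ((PySem.Dict.mk m).get? "role").isSome = true
instance (messages : List (List (String × String))) (max_user_messages : Int) :
    Decidable (Pre_maintain_buffer messages max_user_messages) := by
  unfold Pre_maintain_buffer; infer_instance

def pvWitness_maintain_buffer : (List (List (String × String))) × Int :=
  ([[("role", "user"), ("content", "hi")], [("role", "assistant")], [("role", "user")]], 1)

-- When max_user_messages ≤ 0 and the trim path is reached (≥ 2 non-system messages and more than
-- -max_user_messages user messages), A's slice user_indices[-max_user_messages:] accidentally keeps
-- the last total+max (for 0: all) user messages plus followers, while B keeps none of them (just the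
-- system message, if any), which is the intended meaning of keeping at most max_user_messages users.
def D_maintain_buffer (messages : List (List (String × String))) (max_user_messages : Int) : Prop :=
  max_user_messages ≤ 0 ∧
  2 ≤ (messages.filter (fun m => !(pvRole m == "system"))).length ∧
  -max_user_messages < ((messages.countP (fun m => pvRole m == "user") : Nat) : Int)
instance (messages : List (List (String × String))) (max_user_messages : Int) :
    Decidable (D_maintain_buffer messages max_user_messages) := by
  unfold D_maintain_buffer; infer_instance

def Spec_maintain_buffer (messages : List (List (String × String))) (max_user_messages : Int)
    (out : List (List (String × String))) : Prop :=
  ¬ D_maintain_buffer messages max_user_messages → out = maintain_buffer_alt messages max_user_messages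
instance (messages : List (List (String × String))) (max_user_messages : Int)
    (out : List (List (String × String))) : Decidable (Spec_maintain_buffer messages max_user_messages out) := by
  unfold Spec_maintain_buffer; infer_instance

def pvDiffWitness_maintain_buffer : (List (List (String × String))) × Int :=
  ([[("role", "user")], [("role", "user")]], 0)
def pvDiffWitnessOut_maintain_buffer :
    (List (List (String × String))) × (List (List (String × String))) :=
  ([[("role", "user")], [("role", "user")]], [])

-- ===== CLAIM (what is proved, stated in full; the proofs are below) =====
def Claim_unchanged_maintain_buffer : Prop := ∀ (messages : List (List (String × String))) (max_user_messages : Int), Dom_maintain_buffer messages max_user_messages → Pre_maintain_buffer messages max_user_messages → Spec_maintain_buffer messages max_user_messages (maintain_buffer messages max_user_messages)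
def Claim_changed_maintain_buffer : Prop := Dom_maintain_buffer (pvDiffWitness_maintain_buffer.1) (pvDiffWitness_maintain_buffer.2) ∧ Pre_maintain_buffer (pvDiffWitness_maintain_buffer.1) (pvDiffWitness_maintain_buffer.2) ∧ D_maintain_buffer (pvDiffWitness_maintain_buffer.1) (pvDiffWitness_maintain_buffer.2) ∧ maintain_buffer (pvDiffWitness_maintain_buffer.1) (pvDiffWitness_maintain_buffer.2) = pvDiffWitnessOut_maintain_buffer.1 ∧ maintain_buffer_alt (pvDiffWitness_maintain_buffer.1) (pvDiffWitness_maintain_buffer.2) = pvDiffWitnessOut_maintain_buffer.2 ∧ pvDiffWitnessOut_maintain_buffer.1 ≠ pvDiffWitnessOut_maintain_buffer.2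
def Claim_exact_maintain_buffer : Prop := ∀ (messages : List (List (String × String))) (max_user_messages : Int), Dom_maintain_buffer messages max_user_messages → Pre_maintain_buffer messages max_user_messages → D_maintain_buffer messages max_user_messages → maintain_buffer messages max_user_messages ≠ maintain_buffer_alt messages max_user_messages

-- ===== LEMMAS AND PROOFS =====

def pvU (m : List (String × String)) : Bool := pvRole m == "user"
def pvA (m : List (String × String)) : Bool := pvRole m == "assistant"

-- number of user messages among the first j messages
def pvRankN (l : List (List (String × String))) (j : Nat) : Nat := (l.take j).countP pvU

-- the pointwise keep predicate both ports compute
def pvKeep (th : Int) (l : List (List (String × String))) (r : Int) (p : Bool) (j : Nat) : Bool :=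
  (pvU (l.getD j []) && decide (th ≤ r + (pvRankN l j : Int)))
  || (pvA (l.getD j []) &&
      (if j = 0 then p else pvU (l.getD (j-1) []) && decide (th ≤ r + (pvRankN l (j-1) : Int))))

-- B's streaming pass, as a structural recursion
def pvRef (th : Int) : List (List (String × String)) → Int → Bool → List (List (String × String))
  | [], _, _ => []
  | m :: rest, r, p =>
    if pvU m then
      if th ≤ r then m :: pvRef th rest (r + 1) true else pvRef th rest (r + 1) false
    else
      if pvA m && p then m :: pvRef th rest r false else pvRef th rest r false

theorem pvU_not_pvA {m : List (String × String)} (h : pvU m = true) : pvA m = false := by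
  simp [pvU, pvA] at *; simp [h]

theorem pvSplit_snd_aux (l : List (List (String × String))) (o : Option (List (String × String)))
    (acc : List (List (String × String))) :
    (l.foldl (fun st msg => if pvRole msg = "system" then (some msg, st.2) else (st.1, st.2 ++ [msg])) (o, acc)).2
    = acc ++ l.filter (fun m => !(pvRole m == "system")) := by
  induction l generalizing o acc with
  | nil => simp
  | cons m rest ih =>
    by_cases h : pvRole m = "system" <;> simp [h, List.filter_cons, ih]

theorem pvSplit_snd (messages : List (List (String × String))) :
    (pvSplit messages).2 = messages.filter (fun m => !(pvRole m == "system")) := by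
  simpa using pvSplit_snd_aux messages none []

theorem pvUi_eq (ns : List (List (String × String))) (s : Int) (acc : List Int) :
    (PySem.List.enumerate ns s).foldl
      (fun acc p => if pvRole p.2 = "user" then acc ++ [p.1] else acc) acc
    = acc ++ ((PySem.List.enumerate ns s).filter (fun p => pvU p.2)).map (·.1) := by
  rw [PySem.List.foldl_append_ite (p := fun (p : Int × List (String × String)) => pvRole p.2 = "user") (f := fun p => p.1)]
  congr 2

theorem pvUi_len (ns : List (List (String × String))) (s : Int) :
    (((PySem.List.enumerate ns s).filter (fun p => pvU p.2)).map (·.1)).length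
    = ns.countP pvU := by
  induction ns generalizing s with
  | nil => simp [PySem.List.enumerate]
  | cons m rest ih =>
    rw [PySem.List.enumerate_cons]
    by_cases h : pvU m <;> simp [List.filter_cons, List.countP_cons, h, ih]

theorem pvUi_drop_mem (ns : List (List (String × String))) (s : Int) (d : Nat) (i : Int) :
    i ∈ ((((PySem.List.enumerate ns s).filter (fun p => pvU p.2)).map (·.1)).drop d)
    ↔ ∃ j : Nat, j < ns.length ∧ i = s + j ∧ pvU (ns.getD j []) = true ∧ d ≤ pvRankN ns j := by
  induction ns generalizing s d with
  | nil => simp [PySem.List.enumerate]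
  | cons m rest ih =>
    rw [PySem.List.enumerate_cons]
    by_cases h : pvU m
    · cases d with
      | zero =>
        simp only [List.filter_cons, h, if_pos, List.map_cons, List.drop_zero]
        constructor
        · intro hm
          rcases List.mem_cons.mp hm with h0 | h1
          · exact ⟨0, by simp, by omega, by simpa [h], by simp [pvRankN]⟩
          · have := (ih (s+1) 0).mp (by simpa using h1)
            obtain ⟨j, hj, hi, hu, _⟩ := this
            exact ⟨j + 1, by simpa using hj, by omega, by simpa using hu, by simp [pvRankN]⟩
        · intro ⟨j, hj, hi, hu, _⟩
          cases j with
          | zero => simp [List.mem_cons]; left; omega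
          | succ j' =>
            apply List.mem_cons.mpr; right
            have := (ih (s+1) 0).mpr ⟨j', by simpa using hj, by omega, by simpa using hu, by simp⟩
            simpa using this
      | succ d' =>
        simp only [List.filter_cons, h, if_pos, List.map_cons, List.drop_succ_cons]
        rw [ih (s+1) d']
        constructor
        · intro ⟨j, hj, hi, hu, hd⟩
          refine ⟨j + 1, by simpa using hj, by omega, by simpa using hu, ?_⟩
          simp [pvRankN, List.countP_cons, h] at *
          omega
        · intro ⟨j, hj, hi, hu, hd⟩
          cases j with
          | zero => simp [pvRankN] at hd
          | succ j' =>
            refine ⟨j', by simpa using hj, by omega, by simpa using hu, ?_⟩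
            simp [pvRankN, List.countP_cons, h] at hd ⊢
            omega
    · simp only [List.filter_cons, h, if_neg, Bool.false_eq_true, not_false_iff, if_false]
      rw [ih (s+1) d]
      constructor
      · intro ⟨j, hj, hi, hu, hd⟩
        refine ⟨j + 1, by simpa using hj, by omega, by simpa using hu, ?_⟩
        simp [pvRankN, List.countP_cons, h] at *
        omega
      · intro ⟨j, hj, hi, hu, hd⟩
        cases j with
        | zero => simp [List.getD_cons_zero] at hu; exact absurd hu h
        | succ j' =>
          refine ⟨j', by simpa using hj, by omega, by simpa using hu, ?_⟩
          simp [pvRankN, List.countP_cons, h] at hd ⊢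
          omega

theorem pvKeep_fold_mem (C : Int → Prop) [DecidablePred C] (l : List Int)
    (s0 : PySem.Set Int) (y : Int) :
    y ∈ l.foldl (fun s x => if C x then PySem.Set.add s (x + 1) else s) s0
    ↔ y ∈ s0 ∨ ∃ x ∈ l, C x ∧ y = x + 1 := by
  induction l generalizing s0 with
  | nil => simp
  | cons x rest ih =>
    simp only [List.foldl_cons]
    by_cases h : C x
    · rw [if_pos h, ih, PySem.Set.mem_add]
      constructor
      · rintro (⟨hy | hy⟩ | ⟨x', hx', hc, he⟩)
        · exact Or.inl hy
        · exact Or.inr ⟨x, List.mem_cons_self .., h, hy⟩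
        · exact Or.inr ⟨x', List.mem_cons_of_mem _ hx', hc, he⟩
      · rintro (hy | ⟨x', hx', hc, he⟩)
        · exact Or.inl (Or.inl hy)
        · rcases List.mem_cons.mp hx' with rfl | hx'
          · exact Or.inl (Or.inr he)
          · exact Or.inr ⟨x', hx', hc, he⟩
    · rw [if_neg h, ih]
      constructor
      · rintro (hy | ⟨x', hx', hc, he⟩)
        · exact Or.inl hy
        · exact Or.inr ⟨x', List.mem_cons_of_mem _ hx', hc, he⟩
      · rintro (hy | ⟨x', hx', hc, he⟩)
        · exact Or.inl hy
        · rcases List.mem_cons.mp hx' with rfl | hx'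
          · exact absurd hc h
          · exact Or.inr ⟨x', hx', hc, he⟩

theorem pvFold_eq_ref (th : Int) (l : List (List (String × String))) (r : Int) (p : Bool)
    (acc : List (List (String × String))) :
    (l.foldl
      (fun (st : Int × Bool × List (List (String × String))) m =>
        if pvRole m = "user" then
          if st.1 ≥ th then (st.1 + 1, true, st.2.2 ++ [m])
          else (st.1 + 1, false, st.2.2)
        else
          if pvRole m = "assistant" ∧ st.2.1 then (st.1, false, st.2.2 ++ [m])
          else (st.1, false, st.2.2))
      (r, p, acc)).2.2 = acc ++ pvRef th l r p := by
  induction l generalizing r p acc with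
  | nil => simp [pvRef]
  | cons m rest ih =>
    simp only [List.foldl_cons]
    by_cases hu : pvRole m = "user"
    · by_cases hr : th ≤ r
      · simp only [hu, if_pos, ge_iff_le, hr, if_true]
        rw [ih, pvRef]
        simp [pvU, hu, hr]
      · simp only [hu, if_pos, ge_iff_le, hr, if_false]
        rw [ih, pvRef]
        simp [pvU, hu, hr]
    · by_cases ha : pvRole m = "assistant" ∧ p = true
      · simp only [hu, if_neg, if_false]
        rw [if_pos (by simpa using ha), ih, pvRef]
        simp [pvU, pvA, hu, ha.1, ha.2]
      · simp only [hu, if_neg, if_false]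
        rw [if_neg (by simpa using ha), ih, pvRef]
        have : (pvA m && p) = false := by
          rcases not_and_or.mp ha with h | h
          · simp [pvA, h]
          · simp [Bool.not_eq_true] at h
            simp [h]
        simp [pvU, hu, this]

theorem pvKeep_succ (th : Int) (m : List (String × String))
    (rest : List (List (String × String))) (r : Int) (p : Bool) (j : Nat) :
    pvKeep th (m :: rest) r p (j + 1)
    = pvKeep th rest (r + if pvU m then 1 else 0) (pvU m && decide (th ≤ r)) j := by
  unfold pvKeep
  cases j with
  | zero =>
    by_cases hu : pvU m <;>
      simp [pvRankN, List.countP_cons, hu, List.getD_cons_zero, add_assoc, add_comm, add_left_comm]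
  | succ j' =>
    by_cases hu : pvU m <;>
      simp [pvRankN, List.take_succ_cons, List.countP_cons, hu, add_assoc, add_comm, add_left_comm]

theorem pvKeep_zero (th : Int) (m : List (String × String))
    (rest : List (List (String × String))) (r : Int) (p : Bool) :
    pvKeep th (m :: rest) r p 0 = ((pvU m && decide (th ≤ r)) || (pvA m && p)) := by
  simp [pvKeep, pvRankN, List.getD_cons_zero]

theorem pvRef_eq_filter (th : Int) (l : List (List (String × String))) (r : Int) (p : Bool) :
    pvRef th l r p
    = ((List.range l.length).filter (fun j => pvKeep th l r p j)).map (fun j => l.getD j []) := by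
  induction l generalizing r p with
  | nil => simp [pvRef]
  | cons m rest ih =>
    have hrange : List.range (m :: rest).length = 0 :: (List.range rest.length).map (· + 1) := by
      simp [List.range_succ_eq_map]
    rw [hrange]
    rw [List.filter_cons]
    have hshift :
        ((List.range rest.length).map (· + 1)).filter (fun j => pvKeep th (m :: rest) r p j)
        = ((List.range rest.length).filter
            (fun j => pvKeep th rest (r + if pvU m then 1 else 0) (pvU m && decide (th ≤ r)) j)).map (· + 1) := by
      rw [List.filter_map]
      congr 1
      apply List.filter_congr
      intro j _
      simpa using pvKeep_succ th m rest r p j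
    by_cases hk : pvKeep th (m :: rest) r p 0
    · rw [if_pos (by simpa using hk), hshift]
      rw [pvKeep_zero] at hk
      rw [pvRef]
      by_cases hu : pvU m
      · have hA := pvU_not_pvA hu
        have hr : th ≤ r := by simpa [hu, hA] using hk
        rw [if_pos hu, if_pos hr, ih (r + 1) true]
        simp [hu, hr, List.map_map, Function.comp_def, List.getD_cons_succ, List.getD_cons_zero]
      · have hp : (pvA m && p) = true := by simpa [hu] using hk
        rw [if_neg (by simp [hu]), hp, if_pos rfl, ih r false]
        simp [hu, List.map_map, Function.comp_def, List.getD_cons_succ, List.getD_cons_zero]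
    · rw [if_neg (by simpa using hk), hshift]
      rw [pvKeep_zero] at hk
      rw [pvRef]
      by_cases hu : pvU m
      · have hA := pvU_not_pvA hu
        have hr : ¬ th ≤ r := by
          intro h
          exact hk (by simp [hu, hA, h])
        rw [if_pos hu, if_neg hr, ih (r + 1) false]
        simp [hu, hr, List.map_map, Function.comp_def, List.getD_cons_succ]
      · have hp : (pvA m && p) = false := by
          rcases Bool.eq_false_or_eq_true (pvA m && p) with h | h
          · exact absurd (by simp [hu, h]) hk
          · exact h
        rw [if_neg (by simp [hu]), hp, if_neg (by simp), ih r false]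
        simp [hu, List.map_map, Function.comp_def, List.getD_cons_succ]

theorem pvRef_eq_nil (th : Int) (l : List (List (String × String))) (r : Int)
    (h : r + (l.countP pvU : Int) ≤ th) : pvRef th l r false = [] := by
  induction l generalizing r with
  | nil => simp [pvRef]
  | cons m rest ih =>
    rw [pvRef]
    by_cases hu : pvU m
    · rw [if_pos hu, if_neg (by simp [List.countP_cons, hu] at h; omega)]
      exact ih (r + 1) (by simp [List.countP_cons, hu] at h ⊢; omega)
    · rw [if_neg hu]
      simp only [Bool.and_false, if_false]
      exact ih r (by simp [List.countP_cons, hu] at h ⊢; omega)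

theorem pvPrepend_eq (sys : Option (List (String × String))) (f : List (List (String × String))) :
    pvPrepend sys f
    = (match sys with | some s => if s ≠ [] then [s] else [] | none => ([] : List (List (String × String)))) ++ f := by
  cases sys with
  | none => simp [pvPrepend]
  | some s => by_cases h : s = [] <;> simp [pvPrepend, h]

theorem pvCount_eq (ns : List (List (String × String))) :
    ns.foldl (fun n m => if pvRole m = "user" then n + 1 else n) 0 = (ns.countP pvU : Int) := by
  rw [PySem.List.foldl_ite_add_one (p := fun m => pvRole m = "user")]
  simp only [Int.zero_add, Int.natCast_inj]
  apply List.countP_congr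
  intro m _
  simp [pvU]

theorem pvCount_filter (messages : List (List (String × String))) :
    (messages.filter (fun m => !(pvRole m == "system"))).countP pvU
    = messages.countP (fun m => pvRole m == "user") := by
  rw [List.countP_filter]
  apply List.countP_congr
  intro m _
  by_cases h : pvRole m = "user" <;> simp [pvU, h]

theorem pvKeep_true_iff (d : Nat) (ns : List (List (String × String))) (j : Nat) :
    pvKeep (d : Int) ns 0 false j = true
    ↔ (pvU (ns.getD j []) = true ∧ d ≤ pvRankN ns j)
      ∨ (pvA (ns.getD j []) = true ∧ j ≠ 0 ∧ pvU (ns.getD (j-1) []) = true ∧ d ≤ pvRankN ns (j-1)) := by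
  unfold pvKeep
  by_cases h0 : j = 0
  · subst h0
    cases hu : pvU (ns.getD 0 []) <;> cases ha : pvA (ns.getD 0 []) <;>
      simp only [List.getD_eq_getElem?_getD] at hu ha <;>
      simp [hu, ha, pvRankN]
  · cases hu : pvU (ns.getD j []) <;> cases ha : pvA (ns.getD j []) <;>
      cases hu' : pvU (ns.getD (j-1) []) <;>
      simp only [List.getD_eq_getElem?_getD] at hu ha hu' <;>
      simp [h0, hu, ha, hu']

theorem pvContains_keep (ns : List (List (String × String))) (d j : Nat) (hj : j < ns.length) :
    PySem.Set.contains
      ((PySem.Set.ofList ((((PySem.List.enumerate ns).filter (fun p => pvU p.2)).map (·.1)).drop d)).foldl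
        (fun s idx =>
          if idx + 1 < (ns.length : Int) ∧
              pvRole (PySem.List.pyGetD ns (idx + 1) []) = "assistant"
          then PySem.Set.add s (idx + 1) else s)
        (PySem.Set.ofList ((((PySem.List.enumerate ns).filter (fun p => pvU p.2)).map (·.1)).drop d)))
      ((j : Nat) : Int)
    = pvKeep (d : Int) ns 0 false j := by
  rw [Bool.eq_iff_iff, PySem.Set.contains_iff, pvKeep_true_iff,
    pvKeep_fold_mem (C := fun x => x + 1 < (ns.length : Int) ∧
      pvRole (PySem.List.pyGetD ns (x + 1) []) = "assistant")]
  constructor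
  · rintro (hmem | ⟨x, hx, ⟨hlt, hrole⟩, heq⟩)
    · rw [PySem.Set.mem_ofList, pvUi_drop_mem] at hmem
      obtain ⟨j', hj', heq, hu, hd⟩ := hmem
      have : j = j' := by omega
      subst this
      exact Or.inl ⟨hu, hd⟩
    · rw [PySem.Set.mem_ofList, pvUi_drop_mem] at hx
      obtain ⟨j'', hj'', heqx, hu, hd⟩ := hx
      have hjj : j = j'' + 1 := by omega
      have hgd : PySem.List.pyGetD ns (x + 1) [] = ns.getD j [] := by
        rw [show x + 1 = ((j : Nat) : Int) by omega, PySem.List.pyGetD_natCast]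
      right
      refine ⟨?_, by omega, ?_, ?_⟩
      · rw [hgd] at hrole
        simp only [pvA, beq_iff_eq]
        exact hrole
      · rw [show j - 1 = j'' by omega]; exact hu
      · rw [show j - 1 = j'' by omega]; exact hd
  · rintro (⟨hu, hd⟩ | ⟨ha, h0, hu, hd⟩)
    · left
      rw [PySem.Set.mem_ofList, pvUi_drop_mem]
      exact ⟨j, hj, by omega, hu, hd⟩
    · right
      refine ⟨((j - 1 : Nat) : Int), ?_, ⟨by omega, ?_⟩, by omega⟩
      · rw [PySem.Set.mem_ofList, pvUi_drop_mem]
        exact ⟨j - 1, by omega, by omega, hu, hd⟩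
      · rw [show ((j - 1 : Nat) : Int) + 1 = ((j : Nat) : Int) by omega, PySem.List.pyGetD_natCast]
        simp only [pvA, beq_iff_eq] at ha
        exact ha

-- A's rebuild loop as a pointwise filter over positions
theorem pvFiltered_eq (ns : List (List (String × String))) (keep : PySem.Set Int)
    (hpt : ∀ j ∈ List.range ns.length, PySem.Set.contains keep ((j : Nat) : Int) = pvKeep th ns 0 false j) :
    (PySem.List.pyRange 0 (ns.length : Int)).foldl
      (fun acc i =>
        if PySem.Set.contains keep i then acc ++ [PySem.List.pyGetD ns i []] else acc) []
    = ((List.range ns.length).filter (fun j => pvKeep th ns 0 false j)).map (fun j => ns.getD j []) := by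
  rw [PySem.List.foldl_append_if (p := fun i => PySem.Set.contains keep i)
      (f := fun i => PySem.List.pyGetD ns i []), PySem.List.pyRange_zero_nat,
    List.filter_map, List.map_map, List.nil_append]
  rw [List.filter_congr (l := List.range ns.length)
      (q := fun j => pvKeep th ns 0 false j) (by intro j hjr; simpa using hpt j hjr)]
  apply List.map_congr_left
  intro j hjf
  simp [PySem.List.pyGetD_natCast]
-- ===== VERDICT (by name: the statement is the Claim_ definition above) =====
theorem maintain_buffer_spec : Claim_unchanged_maintain_buffer := by
  unfold Claim_unchanged_maintain_buffer
  intro messages k _ _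
  unfold Spec_maintain_buffer
  intro hnD
  unfold maintain_buffer maintain_buffer_alt
  simp only [pvUi_eq, List.nil_append, pvCount_eq]
  by_cases h1 : (pvSplit messages).2.length ≤ 1
  · simp [h1]
  · simp only [if_neg h1]
    rw [pvUi_len]
    by_cases h2 : (((pvSplit messages).2.countP pvU : Nat) : Int) ≤ k
    · simp [h2]
    · simp only [if_neg h2]
      rw [pvFold_eq_ref (th := (((pvSplit messages).2.countP pvU : Nat) : Int) - k)]
      by_cases hk : 1 ≤ k
      · -- genuine trim: 1 ≤ k < total users
        have hkt : k.toNat ≤ (pvSplit messages).2.countP pvU := by omega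
        rw [show k = ((k.toNat : Nat) : Int) by omega]
        rw [PySem.List.slice_from_neg_natCast _ _ (show 0 < k.toNat by omega)]
        rw [pvUi_len]
        rw [show ((((pvSplit messages).2.countP pvU : Nat) : Int) - ((k.toNat : Nat) : Int))
              = (((pvSplit messages).2.countP pvU - k.toNat : Nat) : Int) by omega]
        rw [pvFiltered_eq (pvSplit messages).2 _
            (fun j hj => pvContains_keep (pvSplit messages).2 _ j (List.mem_range.mp hj))]
        rw [pvRef_eq_filter, pvPrepend_eq]
      · -- k ≤ 0 and, since ¬D_, at most -k users: both sides trim to nothing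
        have hk0 : k ≤ 0 := by omega
        have hlen : 2 ≤ (pvSplit messages).2.length := by omega
        have hcnt : (((pvSplit messages).2.countP pvU : Nat) : Int) ≤ -k := by
          by_contra hcon
          apply hnD
          refine ⟨hk0, ?_, ?_⟩
          · rw [← pvSplit_snd]; exact hlen
          · rw [← pvCount_filter, ← pvSplit_snd]; omega
        rw [PySem.List.slice_from _ (show (0:Int) ≤ -k by omega)]
        rw [List.drop_eq_nil_of_le (by rw [pvUi_len]; omega)]
        rw [pvRef_eq_nil _ _ _ (by omega), pvPrepend_eq]
        simp [PySem.Set.ofList]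


theorem maintain_buffer_changed : Claim_changed_maintain_buffer := by
  unfold Claim_changed_maintain_buffer; decide

theorem maintain_buffer_tight : Claim_exact_maintain_buffer := by
  unfold Claim_exact_maintain_buffer
  intro messages k _ _ hD
  obtain ⟨hk0, hlen2, hcnt⟩ := hD
  have hns := pvSplit_snd messages
  have hlen : 2 ≤ (pvSplit messages).2.length := by rw [hns]; exact hlen2
  have htN : -k < (((pvSplit messages).2.countP pvU : Nat) : Int) := by
    rw [hns, pvCount_filter]; exact hcnt
  unfold maintain_buffer maintain_buffer_alt
  simp only [pvUi_eq, List.nil_append, pvCount_eq]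
  rw [pvUi_len]
  simp only [if_neg (show ¬((pvSplit messages).2.length ≤ 1) by omega),
    if_neg (show ¬((((pvSplit messages).2.countP pvU : Nat) : Int) ≤ k) by omega)]
  rw [pvFold_eq_ref (th := (((pvSplit messages).2.countP pvU : Nat) : Int) - k)]
  rw [pvRef_eq_nil _ _ _ (by omega)]
  rw [PySem.List.slice_from _ (show (0:Int) ≤ -k by omega)]
  rw [pvFiltered_eq (pvSplit messages).2 _
      (fun j hj => pvContains_keep (pvSplit messages).2 (-k).toNat j (List.mem_range.mp hj))]
  rw [pvPrepend_eq]
  have hdrop :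
      ((((PySem.List.enumerate (pvSplit messages).2).filter (fun p => pvU p.2)).map (·.1)).drop (-k).toNat) ≠ [] := by
    intro hnil
    have hl := congrArg List.length hnil
    rw [List.length_drop, pvUi_len] at hl
    simp at hl
    omega
  obtain ⟨x, hx⟩ := List.exists_mem_of_ne_nil _ hdrop
  rw [pvUi_drop_mem] at hx
  obtain ⟨j, hjlen, hxj, hu, hd⟩ := hx
  have hkeepj : pvKeep (((-k).toNat : Nat) : Int) (pvSplit messages).2 0 false j = true :=
    (pvKeep_true_iff _ _ _).mpr (Or.inl ⟨hu, hd⟩)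
  intro heq
  have heq' := List.append_cancel_left heq
  rw [List.map_eq_nil_iff] at heq'
  have hmem : j ∈ (List.range (pvSplit messages).2.length).filter
      (fun j => pvKeep (((-k).toNat : Nat) : Int) (pvSplit messages).2 0 false j) :=
    List.mem_filter.mpr ⟨List.mem_range.mpr hjlen, hkeepj⟩
  rw [heq'] at hmem
  exact List.not_mem_nil hmem
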